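-- pv_equiv track=rewrite | github.com/Ishikaaa/Sabudh-Foundations | 100 Days Code/Day_032.py | recursive_palindrome
-- ===== SOURCE A (Python) =====
-- def check_pelidrome(input_string):
--     return input_string==input_string[::-1]
--
-- def giving_space(input_string):
--     a = ""
--     for i in input_string:
--         a+=i+" "
--     return a[:-1]
--
-- def recursive_palindrome(input_string):
--     result=[giving_space(input_string)]
--     len_input_string = len(input_string)
--     for i in range(len_input_string):
--         for j in range(i+2, len_input_string+1):
--             if check_pelidrome(input_string[i:j]):
--                 a = giving_space(input_string[:i]) +" "+ input_string[i:j] +" "+ giving_space(input_string[j:])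
--                 a = a.strip()
--                 result.append(a)
--     if check_pelidrome(input_string):
--         if input_string not in result:
--             result.append(input_string)
--     return result
-- ===== SOURCE B (Python) =====
-- def recursive_palindrome(input_string):
--     s = input_string
--     n = len(s)
--     # pal holds every pair (i, j), j - i >= 2, such that s[i:j] is a palindrome,
--     # built bottom-up by length in O(n^2) instead of re-checking each slice.
--     pal = set()
--     prev = {i for i in range(n + 1)}   # starts of palindromic slices of length L-2
--     cur = {i for i in range(n)}        # ... of length L-1
--     for L in range(2, n + 1):
--         nxt = {i for i in range(n - L + 1) if s[i] == s[i + L - 1] and i + 1 in prev}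
--         pal |= {(i, i + L) for i in nxt}
--         prev, cur = cur, nxt
--     result = [" ".join(s)]
--     for i in range(n):
--         for j in range(i + 2, n + 1):
--             if (i, j) in pal:
--                 result.append((" ".join(s[:i]) + " " + s[i:j] + " " + " ".join(s[j:])).strip())
--     if (0, n) in pal or n <= 1:
--         if s not in result:
--             result.append(s)
--     return result
-- ===== Notes on version B (the rewrite author's own statement) =====
-- stated objective: alternative
-- what changed: B precomputes the set of palindromic index pairs with a bottom-up length-by-length dynamic program (keeping only the two previous diagonals), so the double output loop tests each substring by an O(1) set lookup instead of A's slice-and-reverse re-check; intended as faster (measured 2-3x at mid sizes) but the O(n^3)-character output itself dominates on the largest palindrome-rich inputs, so a timing run could not confirm it at the top size.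
import Mathlib
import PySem

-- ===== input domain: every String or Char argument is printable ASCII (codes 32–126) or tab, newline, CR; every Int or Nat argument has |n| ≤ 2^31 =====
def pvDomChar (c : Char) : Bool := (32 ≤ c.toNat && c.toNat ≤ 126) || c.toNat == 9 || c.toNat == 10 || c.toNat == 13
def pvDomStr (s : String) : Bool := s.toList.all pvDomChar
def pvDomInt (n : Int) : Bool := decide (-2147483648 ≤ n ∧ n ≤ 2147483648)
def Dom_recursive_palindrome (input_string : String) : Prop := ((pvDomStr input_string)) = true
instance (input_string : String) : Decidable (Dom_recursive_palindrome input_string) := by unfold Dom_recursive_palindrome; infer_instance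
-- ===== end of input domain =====

-- B replaces A's slice-and-reverse palindrome re-check inside the double loop by a
-- bottom-up dynamic-programming set of palindromic index pairs built once by length.

-- ===== PORT A =====
-- check_pelidrome: input_string == input_string[::-1]
def pvCheckPelidrome (s : List Char) : Bool :=
  some s == PySem.List.slice? s none none (-1)

-- giving_space: a = ""; for i in s: a += i + " "; return a[:-1]
def pvGivingSpace (s : List Char) : List Char :=
  PySem.List.slice (s.foldl (fun a c => a ++ [c, ' ']) []) none (some (-1))

def recursive_palindrome (input_string : String) : List String :=
  let cs := input_string.toList
  let n : Int := cs.length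
  let result : List String := [String.ofList (pvGivingSpace cs)]
  let result := (PySem.List.pyRange 0 n).foldl (fun result i =>
    (PySem.List.pyRange (i + 2) (n + 1)).foldl (fun result j =>
      if pvCheckPelidrome (PySem.List.slice cs (some i) (some j)) then
        result ++ [String.ofList (PySem.Chars.strip
          (pvGivingSpace (PySem.List.slice cs none (some i)) ++ [' ']
            ++ PySem.List.slice cs (some i) (some j) ++ [' ']
            ++ pvGivingSpace (PySem.List.slice cs (some j) none)))]
      else result) result) result
  if pvCheckPelidrome cs then
    if !(result.contains input_string) then result ++ [input_string] else result
  else result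

-- ===== PORT B =====
-- " ".join(s)
def pvJoinSp (s : List Char) : List Char :=
  PySem.Chars.join [' '] (s.map (fun c => [c]))

-- the DP loop of Source B: (pal, prev, cur) stepped over lengths L = 2 .. n
def pvPalSet (cs : List Char) : PySem.Set (Int × Int) :=
  let n : Int := cs.length
  ((PySem.List.pyRange 2 (n + 1)).foldl
    (fun (st : PySem.Set (Int × Int) × PySem.Set Int × PySem.Set Int) L =>
      let nxt : PySem.Set Int := PySem.Set.ofList
        ((PySem.List.pyRange 0 (n - L + 1)).filter
          (fun i => PySem.List.pyGet? cs i == PySem.List.pyGet? cs (i + L - 1)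
                     && st.2.1.contains (i + 1)))
      (st.1.union (PySem.Set.ofList (nxt.map (fun i => (i, i + L)))), st.2.2, nxt))
    (PySem.Set.empty,
     PySem.Set.ofList (PySem.List.pyRange 0 (n + 1)),
     PySem.Set.ofList (PySem.List.pyRange 0 n))).1

def recursive_palindrome_alt (input_string : String) : List String :=
  let cs := input_string.toList
  let n : Int := cs.length
  let pal := pvPalSet cs
  let result : List String := [String.ofList (pvJoinSp cs)]
  let result := (PySem.List.pyRange 0 n).foldl (fun result i =>
    (PySem.List.pyRange (i + 2) (n + 1)).foldl (fun result j =>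
      if pal.contains (i, j) then
        result ++ [String.ofList (PySem.Chars.strip
          (pvJoinSp (PySem.List.slice cs none (some i)) ++ [' ']
            ++ PySem.List.slice cs (some i) (some j) ++ [' ']
            ++ pvJoinSp (PySem.List.slice cs (some j) none)))]
      else result) result) result
  if pal.contains (0, n) || decide (n ≤ 1) then
    if !(result.contains input_string) then result ++ [input_string] else result
  else result

-- ===== PRECONDITION & SPEC =====
def Spec_recursive_palindrome (input_string : String) (out : List String) : Prop := out = recursive_palindrome_alt input_string
instance (input_string : String) (out : List String) : Decidable (Spec_recursive_palindrome input_string out) := by unfold Spec_recursive_palindrome; infer_instance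

-- ===== CLAIM (what is proved, stated in full; the proofs are below) =====
def Claim_equal_recursive_palindrome : Prop := ∀ (input_string : String), Dom_recursive_palindrome input_string → Spec_recursive_palindrome input_string (recursive_palindrome input_string)

-- ===== LEMMAS AND PROOFS =====

-- s[a : a+l] (as Nat start/length) is a palindrome
def pvPalNat (cs : List Char) (a l : Nat) : Prop :=
  ((cs.drop a).take l).reverse = (cs.drop a).take l

theorem pvCheckPelidrome_iff (s : List Char) : pvCheckPelidrome s = true ↔ s.reverse = s := by
  rw [pvCheckPelidrome, PySem.List.slice?_none_none_neg_one, beq_iff_eq]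
  constructor
  · intro h; exact (Option.some_inj.mp h).symm
  · intro h; rw [h]

theorem pvPalNat_zero (cs : List Char) (a : Nat) : pvPalNat cs a 0 := by simp [pvPalNat]

theorem pvPalNat_one (cs : List Char) (a : Nat) : pvPalNat cs a 1 := by
  unfold pvPalNat
  rw [List.take_one]
  cases (cs.drop a).head? <;> simp

theorem pvRevSandwich (a b : Char) (m : List Char) :
    (a :: (m ++ [b])).reverse = a :: (m ++ [b]) ↔ b = a ∧ m.reverse = m := by
  simp only [List.reverse_cons, List.reverse_append, List.reverse_cons, List.reverse_nil,
    List.nil_append, List.cons_append, List.cons.injEq]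
  constructor
  · rintro ⟨hb, h⟩
    subst hb
    exact ⟨rfl, by simpa using h⟩
  · rintro ⟨hb, h⟩
    subst hb
    simp [h]

theorem pvPalNat_succ_succ (cs : List Char) (a l : Nat) (h : a + (l + 2) ≤ cs.length) :
    pvPalNat cs a (l + 2) ↔ (cs[a]? = cs[a + l + 1]? ∧ pvPalNat cs (a + 1) l) := by
  have ha : a < cs.length := by omega
  have hb : a + l + 1 < cs.length := by omega
  have hdrop : cs.drop a = cs[a] :: cs.drop (a + 1) := List.drop_eq_getElem_cons ha
  have htake : (cs.drop (a + 1)).take (l + 1)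
      = (cs.drop (a + 1)).take l ++ [cs[a + l + 1]] := by
    rw [List.take_add_one]
    have : (cs.drop (a + 1))[l]? = some cs[a + l + 1] := by
      rw [List.getElem?_drop]
      rw [List.getElem?_eq_getElem (by omega)]
      congr 1
      congr 1
      omega
    simp [this]
  have hmid : (cs.drop a).take (l + 2) = cs[a] :: ((cs.drop (a + 1)).take l ++ [cs[a + l + 1]]) := by
    rw [hdrop, show l + 2 = (l + 1) + 1 from rfl, List.take_succ_cons, htake]
  unfold pvPalNat
  rw [hmid, pvRevSandwich]
  rw [List.getElem?_eq_getElem ha, List.getElem?_eq_getElem hb]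
  simp [eq_comm]

theorem pvFlatDropLast (s : List Char) :
    (s.flatMap (fun c => [c, ' '])).dropLast = pvJoinSp s := by
  induction s with
  | nil => simp [pvJoinSp, PySem.Chars.join_nil]
  | cons c t ih =>
    cases t with
    | nil => simp [pvJoinSp, PySem.Chars.join_singleton]
    | cons d u =>
      have hne : (d :: u).flatMap (fun c => [c, ' ']) ≠ [] := by simp
      rw [List.flatMap_cons, List.dropLast_append_of_ne_nil hne]
      rw [pvJoinSp, List.map_cons, List.map_cons, PySem.Chars.join_cons_cons]
      simp only [pvJoinSp, List.map_cons] at ih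
      rw [← ih]
      simp

theorem pvGivingSpace_eq_join : pvGivingSpace = pvJoinSp := by
  funext s
  rw [pvGivingSpace, PySem.List.foldl_append_eq_flatMap (fun c => [c, ' ']) s []]
  rw [List.nil_append, PySem.List.slice_to_neg_one, pvFlatDropLast]

-- the loop body of Source B's DP as a named step function (definitionally the lambda in pvPalSet)
def pvStep (cs : List Char) (st : PySem.Set (Int × Int) × PySem.Set Int × PySem.Set Int)
    (L : Int) : PySem.Set (Int × Int) × PySem.Set Int × PySem.Set Int :=
  let n : Int := cs.length
  let nxt : PySem.Set Int := PySem.Set.ofList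
    ((PySem.List.pyRange 0 (n - L + 1)).filter
      (fun i => PySem.List.pyGet? cs i == PySem.List.pyGet? cs (i + L - 1)
                 && st.2.1.contains (i + 1)))
  (st.1.union (PySem.Set.ofList (nxt.map (fun i => (i, i + L)))), st.2.2, nxt)

-- invariant of prev/cur: the set of starts of palindromic slices of length m
def pvSInv (cs : List Char) (m : Nat) (s : PySem.Set Int) : Prop :=
  ∀ x : Int, x ∈ s ↔ ∃ a : Nat, x = (a : Int) ∧ a + m ≤ cs.length ∧ pvPalNat cs a m

-- invariant of pal: all palindromic pairs of length 2..L
def pvPInv (cs : List Char) (L : Nat) (p : PySem.Set (Int × Int)) : Prop :=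
  ∀ x : Int × Int, x ∈ p ↔ ∃ a l : Nat,
    x = ((a : Int), ((a + l : Nat) : Int)) ∧ 2 ≤ l ∧ l ≤ L ∧ a + l ≤ cs.length ∧ pvPalNat cs a l

theorem pvStep_inv (cs : List Char) (L : Nat) (hL : 2 ≤ L) (hLn : L ≤ cs.length)
    (st : PySem.Set (Int × Int) × PySem.Set Int × PySem.Set Int)
    (hp : pvPInv cs (L - 1) st.1) (hprev : pvSInv cs (L - 2) st.2.1) (hcur : pvSInv cs (L - 1) st.2.2) :
    pvPInv cs L (pvStep cs st (L : Int)).1 ∧ pvSInv cs (L - 1) (pvStep cs st (L : Int)).2.1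
      ∧ pvSInv cs L (pvStep cs st (L : Int)).2.2 := by
  have hnxt : pvSInv cs L (pvStep cs st (L : Int)).2.2 := by
    intro x
    show x ∈ PySem.Set.ofList _ ↔ _
    rw [PySem.Set.mem_ofList, List.mem_filter, PySem.List.mem_pyRange_one]
    constructor
    · rintro ⟨⟨hx0, hxlt⟩, hcond⟩
      obtain ⟨a, rfl⟩ := Int.eq_ofNat_of_zero_le hx0
      have han : a + L ≤ cs.length := by omega
      refine ⟨a, rfl, han, ?_⟩
      rw [Bool.and_eq_true] at hcond
      obtain ⟨hch, hmem⟩ := hcond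
      rw [PySem.Set.contains_iff] at hmem
      rw [hprev ((a : Int) + 1)] at hmem
      obtain ⟨a', ha', _, hpal'⟩ := hmem
      have haa : a' = a + 1 := by omega
      subst haa
      have h1 : ((a : Int) + L - 1) = ((a + L - 1 : Nat) : Int) := by omega
      rw [h1, PySem.List.pyGet?_natCast, PySem.List.pyGet?_natCast, beq_iff_eq] at hch
      have hrw : L = (L - 2) + 2 := by omega
      rw [hrw, pvPalNat_succ_succ cs a (L - 2) (by omega)]
      constructor
      · have : a + (L - 2) + 1 = a + L - 1 := by omega
        rw [this]; exact hch
      · exact hpal'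
    · rintro ⟨a, rfl, han, hpal⟩
      have hrw : L = (L - 2) + 2 := by omega
      rw [hrw, pvPalNat_succ_succ cs a (L - 2) (by omega)] at hpal
      obtain ⟨hch, hmid⟩ := hpal
      refine ⟨⟨by positivity, by omega⟩, ?_⟩
      rw [Bool.and_eq_true]
      constructor
      · have h1 : ((a : Int) + L - 1) = ((a + L - 1 : Nat) : Int) := by omega
        rw [h1, PySem.List.pyGet?_natCast, PySem.List.pyGet?_natCast, beq_iff_eq]
        have : a + (L - 2) + 1 = a + L - 1 := by omega
        rw [this] at hch; exact hch
      · rw [PySem.Set.contains_iff, hprev]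
        exact ⟨a + 1, by push_cast; ring, by omega, hmid⟩
  refine ⟨?_, hcur, hnxt⟩
  intro x
  show x ∈ PySem.Set.union _ _ ↔ _
  rw [PySem.Set.mem_union, PySem.Set.mem_ofList, List.mem_map, hp x]
  constructor
  · rintro (⟨a, l, hx, h2, hl, han, hpal⟩ | ⟨i, hi, rfl⟩)
    · exact ⟨a, l, hx, h2, by omega, han, hpal⟩
    · obtain ⟨a, rfl, han, hpal⟩ := (hnxt i).mp hi
      exact ⟨a, L, by congr 1, hL, le_refl _, han, hpal⟩
  · rintro ⟨a, l, hx, h2, hl, han, hpal⟩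
    by_cases hcase : l ≤ L - 1
    · exact Or.inl ⟨a, l, hx, h2, hcase, han, hpal⟩
    · have : l = L := by omega
      subst this
      exact Or.inr ⟨(a : Int), (hnxt (a : Int)).mpr ⟨a, rfl, han, hpal⟩,
        by rw [hx]; congr 1⟩

theorem pvLoopAux (cs : List Char) : ∀ (k L : Nat)
    (st : PySem.Set (Int × Int) × PySem.Set Int × PySem.Set Int), 2 ≤ L → L + k = cs.length + 1 →
    pvPInv cs (L - 1) st.1 → pvSInv cs (L - 2) st.2.1 → pvSInv cs (L - 1) st.2.2 →
    pvPInv cs cs.length ((PySem.List.pyRange (L : Int) ((cs.length : Int) + 1)).foldl (pvStep cs) st).1 := by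
  intro k
  induction k with
  | zero =>
    intro L st hL hk hp _ _
    have hnil : PySem.List.pyRange (L : Int) ((cs.length : Int) + 1) = [] := by
      simp only [PySem.List.pyRange]
      rw [if_neg (by norm_num), if_pos (by norm_num),
        if_neg (by omega : ¬ ((L : Int) < (cs.length : Int) + 1))]
      simp
    rw [hnil, List.foldl_nil]
    have : L - 1 = cs.length := by omega
    rwa [this] at hp
  | succ k ih =>
    intro L st hL hk hp hprev hcur
    have hLn : L ≤ cs.length := by omega
    have hcons : PySem.List.pyRange (L : Int) ((cs.length : Int) + 1)
        = (L : Int) :: PySem.List.pyRange ((L : Int) + 1) ((cs.length : Int) + 1) := by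
      apply PySem.List.pyRange_one_cons
      omega
    rw [hcons, List.foldl_cons]
    obtain ⟨hp', hprev', hcur'⟩ := pvStep_inv cs L hL hLn st hp hprev hcur
    have h1 : ((L : Int) + 1) = ((L + 1 : Nat) : Int) := by push_cast; ring
    rw [h1]
    exact ih (L + 1) (pvStep cs st (L : Int)) (by omega) (by omega)
      (by simpa using hp') (by simpa using hprev') (by simpa using hcur')

theorem pvPalSet_eq (cs : List Char) :
    pvPalSet cs = ((PySem.List.pyRange 2 ((cs.length : Int) + 1)).foldl (pvStep cs)
      (PySem.Set.empty,
       PySem.Set.ofList (PySem.List.pyRange 0 ((cs.length : Int) + 1)),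
       PySem.Set.ofList (PySem.List.pyRange 0 (cs.length : Int)))).1 := rfl

theorem mem_pvPalSet (cs : List Char) (x : Int × Int) :
    x ∈ pvPalSet cs ↔ ∃ a l : Nat, x = ((a : Int), ((a + l : Nat) : Int)) ∧ 2 ≤ l ∧ a + l ≤ cs.length ∧ pvPalNat cs a l := by
  rw [pvPalSet_eq]
  have hbase_p : pvPInv cs (2 - 1) (PySem.Set.empty : PySem.Set (Int × Int)) := by
    intro y
    constructor
    · intro hy; exact absurd hy (by simp [PySem.Set.empty])
    · rintro ⟨a, l, _, h2, hl, _, _⟩; omega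
  have hbase_prev : pvSInv cs (2 - 2) (PySem.Set.ofList (PySem.List.pyRange 0 ((cs.length : Int) + 1))) := by
    intro y
    rw [PySem.Set.mem_ofList, PySem.List.mem_pyRange_one]
    constructor
    · rintro ⟨h0, hlt⟩
      obtain ⟨a, rfl⟩ := Int.eq_ofNat_of_zero_le h0
      exact ⟨a, rfl, by omega, pvPalNat_zero cs a⟩
    · rintro ⟨a, rfl, ha, _⟩
      constructor <;> omega
  have hbase_cur : pvSInv cs (2 - 1) (PySem.Set.ofList (PySem.List.pyRange 0 (cs.length : Int))) := by
    intro y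
    rw [PySem.Set.mem_ofList, PySem.List.mem_pyRange_one]
    constructor
    · rintro ⟨h0, hlt⟩
      obtain ⟨a, rfl⟩ := Int.eq_ofNat_of_zero_le h0
      exact ⟨a, rfl, by omega, pvPalNat_one cs a⟩
    · rintro ⟨a, rfl, ha, _⟩
      constructor <;> omega
  rcases Nat.eq_zero_or_pos cs.length with hn | hn
  · have h1 : ((cs.length : Int) + 1) = 1 := by rw [hn]; norm_num
    rw [h1]
    have hnil : PySem.List.pyRange 2 1 = [] := by decide
    rw [hnil, List.foldl_nil]
    constructor
    · intro hy; exact absurd hy (by simp [PySem.Set.empty])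
    · rintro ⟨a, l, _, h2, hl, _⟩; omega
  · have hfold := pvLoopAux cs (cs.length - 1) 2
      (PySem.Set.empty,
       PySem.Set.ofList (PySem.List.pyRange 0 ((cs.length : Int) + 1)),
       PySem.Set.ofList (PySem.List.pyRange 0 (cs.length : Int))) (by norm_num) (by omega)
      hbase_p hbase_prev hbase_cur
    have hcast : (((2 : Nat) : Int)) = (2 : Int) := by norm_num
    rw [hcast] at hfold
    rw [hfold x]
    constructor
    · rintro ⟨a, l, hx, h2, _, han, hpal⟩
      exact ⟨a, l, hx, h2, han, hpal⟩
    · rintro ⟨a, l, hx, h2, han, hpal⟩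
      exact ⟨a, l, hx, h2, by omega, han, hpal⟩

theorem pvCond_eq (cs : List Char) (i j : Int) (hi : 0 ≤ i) (hj : i + 2 ≤ j) (hn : j ≤ (cs.length : Int)) :
    pvCheckPelidrome (PySem.List.slice cs (some i) (some j)) = (pvPalSet cs).contains (i, j) := by
  rw [Bool.eq_iff_iff, pvCheckPelidrome_iff, PySem.Set.contains_iff, mem_pvPalSet,
    PySem.List.slice_toNat cs hi (by omega)]
  constructor
  · intro h
    refine ⟨i.toNat, j.toNat - i.toNat, ?_, by omega, by omega, h⟩
    have : (i, j) = ((i.toNat : Int), (j.toNat : Int)) := by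
      rw [Prod.mk.injEq]; omega
    rw [this, Prod.mk.injEq]
    constructor
    · rfl
    · push_cast; omega
  · rintro ⟨a, l, hx, h2, han, hpal⟩
    have h1 : i = (a : Int) := congrArg Prod.fst hx
    have h2' : j = ((a + l : Nat) : Int) := congrArg Prod.snd hx
    have ha : i.toNat = a := by omega
    rw [ha]
    have hl : j.toNat - a = l := by omega
    rw [hl]
    exact hpal

theorem pvWhole_eq (cs : List Char) :
    pvCheckPelidrome cs = ((pvPalSet cs).contains (0, (cs.length : Int)) || decide ((cs.length : Int) ≤ 1)) := by
  rw [Bool.eq_iff_iff, pvCheckPelidrome_iff]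
  by_cases hn : cs.length ≤ 1
  · simp only [(by omega : ((cs.length : Int) ≤ 1)), decide_true, Bool.or_true, iff_true]
    match cs, hn with
    | [], _ => rfl
    | [c], _ => rfl
  · have hd : ¬ ((cs.length : Int) ≤ 1) := by omega
    simp only [hd, decide_false, Bool.or_false]
    rw [PySem.Set.contains_iff, mem_pvPalSet]
    constructor
    · intro h
      refine ⟨0, cs.length, by simp, by omega, by omega, ?_⟩
      simpa [pvPalNat, List.take_length] using h
    · rintro ⟨a, l, hx, h2, han, hpal⟩
      have h1 : (0 : Int) = (a : Int) := congrArg Prod.fst hx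
      have h2' : (cs.length : Int) = ((a + l : Nat) : Int) := congrArg Prod.snd hx
      have ha : a = 0 := by omega
      have hl : l = cs.length := by omega
      subst ha; subst hl
      simpa [pvPalNat, List.take_length] using hpal

theorem pvMainFold (cs : List Char) (X : Int → Int → List String) (s0 : List String) :
    (PySem.List.pyRange 0 (cs.length : Int)).foldl (fun result i =>
      (PySem.List.pyRange (i + 2) ((cs.length : Int) + 1)).foldl (fun result j =>
        if pvCheckPelidrome (PySem.List.slice cs (some i) (some j)) then result ++ X i j
        else result) result) s0
    = (PySem.List.pyRange 0 (cs.length : Int)).foldl (fun result i =>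
      (PySem.List.pyRange (i + 2) ((cs.length : Int) + 1)).foldl (fun result j =>
        if (pvPalSet cs).contains (i, j) then result ++ X i j
        else result) result) s0 := by
  apply PySem.List.foldl_congr_mem
  intro acc i hi
  apply PySem.List.foldl_congr_mem
  intro acc2 j hj
  rw [PySem.List.mem_pyRange_one] at hi hj
  rw [pvCond_eq cs i j (by omega) (by omega) (by omega)]

-- ===== VERDICT (by name: the statement is the Claim_ definition above) =====
theorem recursive_palindrome_spec : Claim_equal_recursive_palindrome := by
  intro s _
  simp only [Spec_recursive_palindrome, recursive_palindrome, recursive_palindrome_alt,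
    pvGivingSpace_eq_join]
  rw [pvWhole_eq s.toList]
  rw [pvMainFold s.toList
    (fun i j => [String.ofList (PySem.Chars.strip
      (pvJoinSp (PySem.List.slice s.toList none (some i)) ++ [' ']
        ++ PySem.List.slice s.toList (some i) (some j) ++ [' ']
        ++ pvJoinSp (PySem.List.slice s.toList (some j) none)))])
    [String.ofList (pvJoinSp s.toList)]]
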